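-- pv_equiv track=rewrite | github.com/TestGuru-DE/TaNoS | src/combinatorics/each_choice.py | generate
-- ===== SOURCE A (Python) =====
-- def generate(categories: dict) -> list[dict]:
--     """Each Choice nach ISTQB v4: jeder Wert jeder Kategorie mindestens einmal."""
--     if not categories:
--         return []
--     keys = list(categories.keys())
--     max_len = max(len(v) for v in categories.values())
--     testcases = []
--     for i in range(max_len):
--         tc = {}
--         for k in keys:
--             vals = categories[k]
--             tc[k] = vals[i % len(vals)]
--         testcases.append(tc)
--     return testcases
-- ===== SOURCE B (Python) =====
-- def generate(categories: dict) -> list[dict]: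
--     """Each Choice nach ISTQB v4: column-major — extend every testcase row with one
--     category at a time, instead of building each testcase cell-by-cell."""
--     if not categories:
--         return []
--     keys = list(categories.keys())
--     max_len = max(len(v) for v in categories.values())
--     rows = [[] for _ in range(max_len)]
--     for k in keys:
--         vals = categories[k]
--         n = len(vals)
--         for i, row in enumerate(rows):
--             row.append((k, vals[i % n]))
--     return [dict(row) for row in rows]
-- ===== Notes on version B (the rewrite author's own statement) =====
-- stated objective: alternative
-- what changed: B builds the testcases column-major — one category at a time it extends every testcase row at once (then turns each finished row into a dict) — instead of A's row-major nested loops that build each testcase cell-by-cell.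
-- outside the precondition, e.g. on generate({'a': ['1', '2'], 'b': []}): A raises ZeroDivisionError, B raises ZeroDivisionError
import Mathlib
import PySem

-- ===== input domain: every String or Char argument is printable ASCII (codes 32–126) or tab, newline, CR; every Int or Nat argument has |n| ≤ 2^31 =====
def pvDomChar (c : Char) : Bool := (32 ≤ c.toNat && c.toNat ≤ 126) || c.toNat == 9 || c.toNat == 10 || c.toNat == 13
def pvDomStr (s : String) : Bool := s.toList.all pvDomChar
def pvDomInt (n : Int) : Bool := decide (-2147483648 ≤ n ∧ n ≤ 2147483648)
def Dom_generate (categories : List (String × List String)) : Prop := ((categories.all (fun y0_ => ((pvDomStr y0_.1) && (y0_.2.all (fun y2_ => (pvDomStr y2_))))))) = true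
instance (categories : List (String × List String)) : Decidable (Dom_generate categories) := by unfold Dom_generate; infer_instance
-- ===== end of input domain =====

-- B re-decomposes A column-major: each category extends every testcase row at once,
-- instead of building every testcase cell-by-cell (objective: alternative decomposition).

-- shared data access, `categories[k][i % len(categories[k])]` in both sources;
-- under Pre_generate the `.getD ""` default is never taken (the index is in range)
def pvCell (d : PySem.Dict String (List String)) (k : String) (i : Int) : String :=
  (PySem.List.pyGet? (d.getD k []) (PySem.Int.mod i ((d.getD k []).length : Int))).getD ""

-- `max(len(v) for v in categories.values())`, 0 when there are no values (unreached: the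
-- `if not categories` guard returns first)
def pvMaxLen (d : PySem.Dict String (List String)) : Int :=
  (PySem.List.max? (d.values.map (fun v => (v.length : Int))) (fun x => x)).getD 0

-- ===== PORT A =====
-- Literal port of A; the dict parameter is the association list seen as a Python dict.
def generate (categories : List (String × List String)) : List (List (String × String)) :=
  let d := PySem.Dict.ofList categories
  if d.items = [] then []
  else
    (PySem.List.pyRange 0 (pvMaxLen d) 1).foldl (fun tcs i =>
      tcs ++ [(d.keys.foldl (fun tc k => tc.insert k (pvCell d k i)) PySem.Dict.empty).items]) []

-- ===== PORT B =====
-- Literal port of Source B: rows are extended one category (column) at a time.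
def generate_alt (categories : List (String × List String)) : List (List (String × String)) :=
  let d := PySem.Dict.ofList categories
  if d.items = [] then []
  else
    let rows0 : List (List (String × String)) := (PySem.List.pyRange 0 (pvMaxLen d) 1).map (fun _ => [])
    let rows := d.keys.foldl (fun rows k =>
        (PySem.List.enumerate rows).map (fun p => p.2 ++ [(k, pvCell d k p.1)])) rows0
    rows.map (fun row => (PySem.Dict.ofList row).items)

-- ===== PRECONDITION & SPEC =====
-- Pre_ excludes exactly the inputs where the Python (both A and B) raises
-- ZeroDivisionError: some category has an empty value list while another is nonempty.
def Pre_generate (categories : List (String × List String)) : Prop :=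
  (∀ v ∈ (PySem.Dict.ofList categories).values, v ≠ []) ∨
  (∀ v ∈ (PySem.Dict.ofList categories).values, v = [])
instance (categories : List (String × List String)) : Decidable (Pre_generate categories) := by
  unfold Pre_generate; infer_instance

def pvWitness_generate : (List (String × List String)) := [("a", ["1", "2"]), ("b", ["x"])]

def Spec_generate (categories : List (String × List String)) (out : List (List (String × String))) : Prop := out = generate_alt categories
instance (categories : List (String × List String)) (out : List (List (String × String))) : Decidable (Spec_generate categories out) := by unfold Spec_generate; infer_instance

-- ===== CLAIM (what is proved, stated in full; the proofs are below) =====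
def Claim_equal_generate : Prop := ∀ (categories : List (String × List String)), Dom_generate categories → Pre_generate categories → Spec_generate categories (generate categories)

-- ===== LEMMAS AND PROOFS =====

-- enumerate over a map of pyRange 0 n pairs each element with its own index
theorem enum_map_range {α β : Type} (n : Nat) (g : Int → α) (h : Int → α → β) (dflt : α) :
    (PySem.List.enumerate ((PySem.List.pyRange 0 (n : Int) 1).map g)).map (fun p => h p.1 p.2)
    = (PySem.List.pyRange 0 (n : Int) 1).map (fun i => h i (g i)) := by
  rw [PySem.List.enumerate_eq_map_pyRange _ dflt]
  have hlen : PySem.List.len ((PySem.List.pyRange 0 (n : Int) 1).map g) = (n : Int) := by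
    simp [PySem.List.len, PySem.List.pyRange_zero_natCast]
  rw [hlen, PySem.List.pyRange_zero_natCast]
  simp only [List.map_map]
  refine List.map_congr_left ?_
  intro k hk
  simp only [Function.comp]
  rw [PySem.List.pyGetD_natCast]
  rw [show List.map (g ∘ fun k : Nat => (k : Int)) (List.range n) = List.map (fun k : Nat => g k) (List.range n) from rfl]
  rw [PySem.List.getD_map_range _ _ _ _ (List.mem_range.mp hk)]

-- the column-major fold computes, row by row, the per-row map over the processed keys
theorem fold_cols (d : PySem.Dict String (List String)) (n : Nat) :
    ∀ (ks : List String) (g : Int → List (String × String)),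
    ks.foldl (fun rows k => (PySem.List.enumerate rows).map (fun p => p.2 ++ [(k, pvCell d k p.1)]))
        ((PySem.List.pyRange 0 (n : Int) 1).map g)
    = (PySem.List.pyRange 0 (n : Int) 1).map (fun i => g i ++ ks.map (fun k => (k, pvCell d k i))) := by
  intro ks
  induction ks with
  | nil => intro g; simp
  | cons k ks ih =>
    intro g
    rw [List.foldl_cons]
    rw [enum_map_range n g (fun i row => row ++ [(k, pvCell d k i)]) []]
    rw [ih (fun i => g i ++ [(k, pvCell d k i)])]
    simp [List.append_assoc]

-- A's inner dict-building fold over distinct keys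
theorem fold_row (d : PySem.Dict String (List String)) (keys : List String) (hnd : keys.Nodup) (i : Int) :
    (keys.foldl (fun tc k => tc.insert k (pvCell d k i)) PySem.Dict.empty).items
    = keys.map (fun k => (k, pvCell d k i)) := by
  have := PySem.Dict.items_foldl_insert_fresh (l := keys) (k := fun a => a)
      (v := fun k => pvCell d k i) (d := PySem.Dict.empty)
      (by intro a _; simp) (by simpa using hnd)
  simpa using this

-- B's dict(row) over a row whose keys are distinct
theorem ofList_row (d : PySem.Dict String (List String)) (keys : List String) (hnd : keys.Nodup) (i : Int) :
    (PySem.Dict.ofList (keys.map (fun k => (k, pvCell d k i)))).items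
    = keys.map (fun k => (k, pvCell d k i)) := by
  have := PySem.Dict.items_foldl_insert_fresh (l := keys.map (fun k => (k, pvCell d k i)))
      (k := Prod.fst) (v := Prod.snd) (d := PySem.Dict.empty)
      (by intro a _; simp)
      (by rw [List.map_map]; exact (List.nodup_map_iff (fun a b h => h)).mpr hnd)
  simpa [PySem.Dict.ofList, PySem.Dict.update] using this

theorem pvMaxLen_nonneg (d : PySem.Dict String (List String)) : 0 ≤ pvMaxLen d := by
  unfold pvMaxLen
  rcases h : PySem.List.max? (d.values.map (fun v => (v.length : Int))) (fun x => x) with _ | m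
  · rw [h]; simp
  · have hm := PySem.List.max?_mem h
    rw [h]
    simp only [Option.getD_some]
    rcases List.mem_map.mp hm with ⟨v, _, rfl⟩
    positivity

theorem generate_eq_alt (categories : List (String × List String)) :
    generate categories = generate_alt categories := by
  unfold generate generate_alt
  by_cases hnil : (PySem.Dict.ofList categories).items = []
  · simp [hnil]
  · simp only [hnil, if_false]
    set d := PySem.Dict.ofList categories with hd
    have hk : d.keys.Nodup := PySem.Dict.nodup_keys_ofList categories
    obtain ⟨n, hn⟩ : ∃ n : Nat, pvMaxLen d = (n : Int) :=
      ⟨(pvMaxLen d).toNat, (Int.toNat_of_nonneg (pvMaxLen_nonneg d)).symm⟩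
    rw [hn]
    rw [PySem.List.foldl_append_singleton_eq_map
      (fun i => (d.keys.foldl (fun tc k => tc.insert k (pvCell d k i)) PySem.Dict.empty).items)]
    rw [fold_cols d n d.keys (fun _ => [])]
    rw [List.map_map]
    simp only [List.nil_append]
    refine List.map_congr_left ?_
    intro i _
    rw [fold_row d d.keys hk i, Function.comp_apply, ofList_row d d.keys hk i]

-- ===== VERDICT (by name: the statement is the Claim_ definition above) =====
theorem generate_spec : Claim_equal_generate := by
  intro categories _ _
  unfold Spec_generate
  exact generate_eq_alt categories
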